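-- pv_equiv track=rewrite | github.com/danielewhughes/dissertation | evaluators/sense_and_naturalness/meteor_synonym.py | calculate_chunks
-- ===== SOURCE A (Python) =====
-- def calculate_chunks(reference, hypothesis):
--     """
--     Calculate the number of contiguous matching chunks between reference and hypothesis.
--
--     :param reference: List of reference tokens.
--     :param hypothesis: List of hypothesis tokens.
--     :return: Number of chunks.
--     """
--     if not reference or not hypothesis:
--         return 0
--
--     chunks = 0
--     in_chunk = False
--     for i in range(len(hypothesis)):
--         if hypothesis[i] in reference:
--             if not in_chunk:
--                 chunks += 1
--                 in_chunk = True
--         else: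
--             in_chunk = False
--     return chunks
-- ===== SOURCE B (Python) =====
-- def calculate_chunks(reference, hypothesis):
--     # Inclusion-exclusion on run structure: each chunk contributes its length in
--     # matched tokens and (length - 1) adjacent matched pairs, so
--     # chunks = (# matched tokens) - (# adjacent pairs that are both matched).
--     ref_set = set(reference)
--     flags = [tok in ref_set for tok in hypothesis]
--     matched = sum(flags)
--     joins = sum(1 for a, b in zip(flags, flags[1:]) if a and b)
--     return matched - joins
-- ===== Notes on version B (the rewrite author's own statement) =====
-- stated objective: faster
-- what changed: Replaces the stateful run-detecting loop (with per-token scans of the reference list) by an arithmetic inclusion-exclusion identity: chunks = number of tokens in set(reference) minus number of adjacent matched pairs, computed from a membership mask with no sequential state.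
import Mathlib
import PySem

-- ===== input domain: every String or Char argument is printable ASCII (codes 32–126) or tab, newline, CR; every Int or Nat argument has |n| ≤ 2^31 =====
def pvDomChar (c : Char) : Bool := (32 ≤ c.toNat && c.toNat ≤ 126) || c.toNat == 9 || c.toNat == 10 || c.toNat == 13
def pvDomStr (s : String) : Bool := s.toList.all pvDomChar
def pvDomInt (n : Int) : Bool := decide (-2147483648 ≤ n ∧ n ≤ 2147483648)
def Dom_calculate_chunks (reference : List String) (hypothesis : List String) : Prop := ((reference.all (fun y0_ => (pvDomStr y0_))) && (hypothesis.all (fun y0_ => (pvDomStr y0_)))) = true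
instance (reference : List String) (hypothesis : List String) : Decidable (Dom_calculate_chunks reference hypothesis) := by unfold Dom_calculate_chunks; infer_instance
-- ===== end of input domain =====

-- B replaces A's stateful run-detecting loop (scanning reference per token) by an
-- inclusion-exclusion count: matched tokens minus adjacent matched pairs over a set-membership mask (measured faster).


-- ===== PORT A =====
-- the for-i-in-range loop reads hypothesis[i] for every in-range i in order: folded over the list
def calculate_chunks (reference : List String) (hypothesis : List String) : Int :=
  if reference = [] ∨ hypothesis = [] then 0
  else
    (hypothesis.foldl
      (fun (s : Int × Bool) t =>
        if reference.contains t then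
          if !s.2 then (s.1 + 1, true) else s
        else (s.1, false))
      ((0 : Int), false)).1

-- ===== PORT B =====
def calculate_chunks_alt (reference : List String) (hypothesis : List String) : Int :=
  let refSet : PySem.Set String := PySem.Set.ofList reference
  let flags : List Bool := hypothesis.map (fun tok => PySem.Set.contains refSet tok)
  let matched : Int := (flags.count true : Nat)
  let joins : Int := (((flags.zip flags.tail).countP (fun p => p.1 && p.2) : Nat) : Int)
  matched - joins

-- ===== PRECONDITION & SPEC =====
def Spec_calculate_chunks (reference : List String) (hypothesis : List String) (out : Int) : Prop := out = calculate_chunks_alt reference hypothesis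
instance (reference : List String) (hypothesis : List String) (out : Int) : Decidable (Spec_calculate_chunks reference hypothesis out) := by unfold Spec_calculate_chunks; infer_instance

-- ===== CLAIM (what is proved, stated in full; the proofs are below) =====
def Claim_equal_calculate_chunks : Prop := ∀ (reference : List String) (hypothesis : List String), Dom_calculate_chunks reference hypothesis → Spec_calculate_chunks reference hypothesis (calculate_chunks reference hypothesis)

-- ===== LEMMAS AND PROOFS =====

-- membership in set(reference) is membership in reference
lemma set_contains_eq (reference : List String) (t : String) :
    PySem.Set.contains (PySem.Set.ofList reference) t = reference.contains t := by
  simp [PySem.Set.contains, PySem.Set.mem_ofList]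

-- adjacent "both true" pairs, threaded with the previous flag (boundary prev = false)
def pvPairB : Bool → List Bool → Int
  | _, [] => 0
  | prev, f :: rest => (if prev && f then 1 else 0) + pvPairB f rest

-- B's zip-with-tail pair count equals the threaded pair count from a false boundary
lemma zip_tail_countP_eq (l : List Bool) :
    (((l.zip l.tail).countP (fun p => p.1 && p.2) : Nat) : Int) = pvPairB false l := by
  induction l with
  | nil => rfl
  | cons a l ih =>
    cases l with
    | nil => simp [pvPairB]
    | cons b r =>
      have ih' := ih
      by_cases hb : b = true <;> by_cases ha : a = true <;>
        simp_all [pvPairB, List.countP_cons] <;> omega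

-- loop invariant: A's fold from state (c, prev) = c + (#true) - (threaded pair count from prev)
lemma fold_eq (reference : List String) :
    ∀ (hyp : List String) (c : Int) (b : Bool),
      (hyp.foldl
        (fun (s : Int × Bool) t =>
          if reference.contains t then
            if !s.2 then (s.1 + 1, true) else s
          else (s.1, false))
        (c, b)).1
      = c + ((hyp.map (fun tok => reference.contains tok)).count true : Nat)
          - pvPairB b (hyp.map (fun tok => reference.contains tok)) := by
  intro hyp
  induction hyp with
  | nil => intro c b; simp [pvPairB]
  | cons t rest ih =>
    intro c b
    simp only [List.contains_eq_mem] at ih ⊢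
    simp only [List.foldl_cons, List.map_cons, List.count_cons, pvPairB]
    by_cases hm : t ∈ reference <;> cases b <;>
      simp only [hm, decide_true, decide_false, Bool.not_false,
        Bool.not_true, Bool.false_and, Bool.true_and, Bool.and_true, Bool.and_false,
        if_true, if_false, reduceIte, beq_iff_eq, reduceCtorEq] <;>
      rw [ih] <;> push_cast <;> omega

lemma pvPairB_all_false : ∀ (b : Bool) (l : List Bool), (∀ f ∈ l, f = false) → pvPairB b l = 0 := by
  intro b l
  induction l generalizing b with
  | nil => intro _; rfl
  | cons f rest ih =>
    intro h
    have hf := h f (List.mem_cons_self ..)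
    simp [pvPairB, hf, ih false (fun x hx => h x (List.mem_cons_of_mem _ hx))]

-- ===== VERDICT (by name: the statement is the Claim_ definition above) =====
theorem calculate_chunks_spec : Claim_equal_calculate_chunks := by
  intro reference hypothesis _
  unfold Spec_calculate_chunks calculate_chunks calculate_chunks_alt
  simp only [set_contains_eq, zip_tail_countP_eq]
  by_cases hg : reference = [] ∨ hypothesis = []
  · simp only [hg, if_true]
    rcases hg with h | h
    · subst h
      rw [pvPairB_all_false false _ (by simp)]
      simp [List.count_replicate]
    · subst h; rfl
  · simp only [hg, if_false]
    simpa using (fold_eq reference hypothesis 0 false)
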